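-- pv_equiv track=rewrite | github.com/costas-basdekis/advent-of-code-submissions | year_2023/day_13/part_b.py | get_last_mirror_index_set
-- ===== SOURCE A (Python) =====
-- from typing import List, Optional, Tuple, Union
--
-- def get_last_mirror_index_set(ids: List[int]) -> List[int]:
--     """
--     >>> MirrorValleyExtended(set(), 0, 0).get_last_mirror_index_set([0, 1, 2, 2, 1, 5, 6])
--     []
--     >>> MirrorValleyExtended(set(), 0, 0).get_last_mirror_index_set([0, 1, 2, 3, 4, 4, 3, 2, 1])
--     [4]
--     >>> MirrorValleyExtended(set(), 0, 0).get_last_mirror_index_set([0, 1, 2, 3, 3, 2, 1, 0, 8, 9, 10, 11, 12, 13, 14])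
--     [3]
--     """
--     indexes = []
--     for last_index in range(len(ids)):
--         first_list = ids[:last_index + 1]
--         last_list = ids[last_index + 1:][::-1]
--         if len(first_list) > len(last_list):
--             first_list = first_list[-len(last_list):]
--         elif len(first_list) < len(last_list):
--             last_list = last_list[-len(first_list):]
--         if first_list == last_list:
--             indexes.append(last_index)
--     return indexes
-- ===== SOURCE B (Python) =====
-- def get_last_mirror_index_set(ids):
--     # Border-theoretic O(n) algorithm: a cut after index i is a mirror iff the
--     # even-length block touching the nearer edge is a palindrome, i.e. iff
--     # 2*(i+1) is a palindromic-prefix length or 2*(n-1-i) is a proper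
--     # palindromic-suffix length.  Palindromic prefix lengths of s are exactly
--     # the border lengths of s + [sep] + reversed(s), enumerated by the KMP
--     # failure-function border chain.
--     n = len(ids)
--
--     def pal_prefix_lengths(s):
--         # all positive palindromic-prefix lengths of s (decreasing order)
--         t = s + [None] + s[::-1]
--         m = len(t)
--         f = [0] * (m + 1)  # f[j] = longest proper border of t[:j]
--         k = 0
--         for i in range(1, m):
--             while k > 0 and t[i] != t[k]:
--                 k = f[k]
--             if t[i] == t[k]:
--                 k += 1
--             f[i + 1] = k
--         lengths = []
--         b = f[m]
--         while b > 0: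
--             lengths.append(b)
--             b = f[b]
--         return lengths
--
--     result = set()
--     for L in pal_prefix_lengths(ids):
--         if L % 2 == 0:
--             result.add(L // 2 - 1)
--     for M in pal_prefix_lengths(ids[::-1]):
--         if M % 2 == 0 and M < n:
--             result.add(n - 1 - M // 2)
--     return sorted(result)
-- ===== Notes on version B (the rewrite author's own statement) =====
-- stated objective: faster
-- what changed: B replaces A's per-cut slice/reverse/trim list comparisons (quadratic) by border theory: a cut is a mirror iff the even-length block touching the nearer edge is a palindrome, and all palindromic prefix/suffix lengths are enumerated at once via the KMP failure-function border chain of s+[sep]+reversed(s).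
import Mathlib
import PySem

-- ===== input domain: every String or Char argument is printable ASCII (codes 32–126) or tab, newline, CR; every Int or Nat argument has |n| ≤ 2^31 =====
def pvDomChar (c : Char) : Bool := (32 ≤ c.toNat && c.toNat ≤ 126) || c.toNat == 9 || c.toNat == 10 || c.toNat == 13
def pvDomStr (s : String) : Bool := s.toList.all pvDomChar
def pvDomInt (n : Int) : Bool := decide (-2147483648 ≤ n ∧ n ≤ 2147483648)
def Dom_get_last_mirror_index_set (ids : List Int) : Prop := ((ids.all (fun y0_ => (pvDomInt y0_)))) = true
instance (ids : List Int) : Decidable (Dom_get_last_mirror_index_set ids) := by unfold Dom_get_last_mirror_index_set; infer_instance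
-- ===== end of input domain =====

-- B replaces A's per-cut slice/reverse/trim comparisons by a border-theoretic algorithm:
-- palindromic prefix/suffix lengths via the KMP failure function of s+[sep]+reversed(s).


-- ===== PORT A =====
-- literal transliteration of A: for last_index in range(len(ids)): slice the prefix,
-- reverse the suffix ([::-1] via slice?), trim the longer of the two from the front with
-- a negative-start slice, compare.
def get_last_mirror_index_set (ids : List Int) : List Int :=
  (PySem.List.pyRange 0 (ids.length : Int) 1).foldl (fun indexes last_index =>
    let first_list := PySem.List.slice ids none (some (last_index + 1))
    let last_list := (PySem.List.slice? (PySem.List.slice ids (some (last_index + 1)) none) none none (-1)).getD []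
    if first_list.length > last_list.length then
      if PySem.List.slice first_list (some (-(last_list.length : Int))) none = last_list then
        indexes ++ [last_index] else indexes
    else if first_list.length < last_list.length then
      if first_list = PySem.List.slice last_list (some (-(first_list.length : Int))) none then
        indexes ++ [last_index] else indexes
    else
      if first_list = last_list then indexes ++ [last_index] else indexes) []

-- ===== PORT B =====
-- B-side helpers, transliterating Source B's pal_prefix_lengths.
-- 'while k > 0 and t[i] != t[k]: k = f[k]' — fuel-guarded (fuel = k suffices: f[k] < k)
def pvFall (t : List (Option Int)) (f : List Nat) (x : Option Int) : Nat → Nat → Nat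
  | 0, k => k
  | fuel+1, k => if 0 < k ∧ t.getD k none ≠ x then pvFall t f x fuel (f.getD k 0) else k

-- body of 'for i in range(1, len(t))': f is written sequentially (f[i+1] = k), so the
-- preallocated-list assignment is transcribed as an append
def pvKmpStep (t : List (Option Int)) (st : List Nat × Nat) (i : Nat) : List Nat × Nat :=
  let k0 := pvFall t st.1 (t.getD i none) st.2 st.2
  let k1 := if t.getD i none = t.getD k0 none then k0 + 1 else k0
  (st.1 ++ [k1], k1)

def pvKmpF (t : List (Option Int)) : List Nat :=
  ((List.range' 1 (t.length - 1)).foldl (pvKmpStep t) ([0, 0], 0)).1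

-- 'b = f[m]; while b > 0: lengths.append(b); b = f[b]' — fuel-guarded (b strictly decreases)
def pvChain (f : List Nat) : Nat → Nat → List Nat
  | 0, _ => []
  | fuel+1, b => if 0 < b then b :: pvChain f fuel (f.getD b 0) else []

def pvPalPrefixLengths (s : List Int) : List Nat :=
  let t : List (Option Int) := s.map some ++ [none] ++ (s.reverse.map some)
  let f := pvKmpF t
  pvChain f t.length (f.getD t.length 0)

def get_last_mirror_index_set_alt (ids : List Int) : List Int :=
  let n := ids.length
  let r1 : PySem.Set Int := (pvPalPrefixLengths ids).foldl
    (fun r L => if L % 2 = 0 then PySem.Set.add r (((L / 2 : Nat) : Int) - 1) else r) []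
  let r2 : PySem.Set Int := (pvPalPrefixLengths ids.reverse).foldl
    (fun r M => if M % 2 = 0 ∧ M < n then PySem.Set.add r ((n : Int) - 1 - ((M / 2 : Nat) : Int)) else r) r1
  PySem.List.sorted r2 (fun x => x) false

-- ===== PRECONDITION & SPEC =====
def Spec_get_last_mirror_index_set (ids : List Int) (out : List Int) : Prop := out = get_last_mirror_index_set_alt ids
instance (ids : List Int) (out : List Int) : Decidable (Spec_get_last_mirror_index_set ids out) := by unfold Spec_get_last_mirror_index_set; infer_instance

-- ===== CLAIM (what is proved, stated in full; the proofs are below) =====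
def Claim_equal_get_last_mirror_index_set : Prop := ∀ (ids : List Int), Dom_get_last_mirror_index_set ids → Spec_get_last_mirror_index_set ids (get_last_mirror_index_set ids)


-- ===== LEMMAS AND PROOFS =====

-- ---------- A-side reduction: A = the per-cut predicate filtered over range n ----------

-- A's per-index decision, as a Bool
def pvPA (ids : List Int) (last_index : Int) : Bool :=
  let first_list := PySem.List.slice ids none (some (last_index + 1))
  let last_list := (PySem.List.slice? (PySem.List.slice ids (some (last_index + 1)) none) none none (-1)).getD []
  if first_list.length > last_list.length then
    decide (PySem.List.slice first_list (some (-(last_list.length : Int))) none = last_list)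
  else if first_list.length < last_list.length then
    decide (first_list = PySem.List.slice last_list (some (-(first_list.length : Int))) none)
  else decide (first_list = last_list)

-- per-cut predicate restated: compare head-prefixes of the reversed prefix and the suffix
def pvPB (ids : List Int) (t : Nat) : Bool :=
  let rev := (ids.take (t+1)).reverse
  let rest := ids.drop (t+1)
  let k := min rev.length rest.length
  decide (0 < k ∧ rev.take k = rest.take k)

lemma pvA_foldl_body (ids : List Int) :
    (fun (indexes : List Int) (last_index : Int) =>
      let first_list := PySem.List.slice ids none (some (last_index + 1))
      let last_list := (PySem.List.slice? (PySem.List.slice ids (some (last_index + 1)) none) none none (-1)).getD []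
      if first_list.length > last_list.length then
        if PySem.List.slice first_list (some (-(last_list.length : Int))) none = last_list then
          indexes ++ [last_index] else indexes
      else if first_list.length < last_list.length then
        if first_list = PySem.List.slice last_list (some (-(first_list.length : Int))) none then
          indexes ++ [last_index] else indexes
      else
        if first_list = last_list then indexes ++ [last_index] else indexes)
    = (fun indexes last_index => if pvPA ids last_index then indexes ++ [last_index] else indexes) := by
  funext indexes last_index
  simp only [pvPA]
  split_ifs <;> try rfl
  all_goals exfalso
  all_goals simp only [decide_eq_true_eq] at *
  all_goals exact ‹¬_› ‹_›

lemma pvA_eq (ids : List Int) :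
    get_last_mirror_index_set ids
      = List.map (fun t : Nat => (t : Int))
          (List.filter (fun t : Nat => pvPA ids (t : Int)) (List.range ids.length)) := by
  unfold get_last_mirror_index_set
  rw [pvA_foldl_body]
  rw [PySem.List.pyRange_one]
  simp only [sub_zero, Int.toNat_natCast, List.foldl_map, zero_add]
  rw [PySem.List.foldl_append_if (fun t : Nat => pvPA ids (t : Int)) (fun t : Nat => (t : Int))]
  simp

-- the heart of the A-side: A's trimmed-slice comparison equals the head-prefix comparison,
-- for any nonempty prefix F against the remaining suffix R
lemma pvKey (F R : List Int) (hF : 0 < F.length) :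
    (if F.length > R.length then decide (PySem.List.slice F (some (-(R.length : Int))) none = R.reverse)
     else if F.length < R.length then decide (F = PySem.List.slice R.reverse (some (-(F.length : Int))) none)
     else decide (F = R.reverse))
    = decide (0 < min F.length R.length ∧
        F.reverse.take (min F.length R.length) = R.take (min F.length R.length)) := by
  split_ifs with h1 h2
  · by_cases hR : R.length = 0
    · have hRnil : R = [] := List.eq_nil_of_length_eq_zero hR
      subst hRnil
      have hFne : F ≠ [] := List.ne_nil_of_length_pos hF
      simp [PySem.List.slice_none_none, hFne]
    · have hR' : 0 < R.length := Nat.pos_of_ne_zero hR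
      rw [PySem.List.slice_from_neg_natCast F R.length hR']
      have hmin : min F.length R.length = R.length := by omega
      rw [hmin, List.take_reverse, List.take_length]
      simp only [hR', true_and]
      exact decide_eq_decide.mpr List.reverse_eq_iff.symm
  · rw [PySem.List.slice_from_neg_natCast R.reverse F.length (by omega)]
    have hmin : min F.length R.length = F.length := by omega
    rw [hmin, List.length_reverse]
    have e : List.drop (R.length - F.length) R.reverse = (R.take F.length).reverse := by
      rw [List.reverse_take]
    rw [e]
    have e2 : F.reverse.take F.length = F.reverse := by
      rw [← List.length_reverse (as := F), List.take_length]
    rw [e2]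
    simp only [hF, true_and]
    exact decide_eq_decide.mpr (by rw [List.reverse_eq_iff])
  · have heq : F.length = R.length := by omega
    have hmin : min F.length R.length = F.length := by omega
    rw [hmin]
    have e2 : F.reverse.take F.length = F.reverse := by
      rw [← List.length_reverse (as := F), List.take_length]
    have e3 : R.take F.length = R := by rw [heq, List.take_length]
    rw [e2, e3]
    simp only [hF, true_and]
    exact decide_eq_decide.mpr (by rw [List.reverse_eq_iff])

lemma pvP_pointwise (ids : List Int) (t : Nat) (ht : t < ids.length) :
    pvPA ids (t : Int) = pvPB ids t := by
  have e1 : PySem.List.slice ids none (some ((t : Int) + 1)) = ids.take (t+1) := by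
    have h := PySem.List.slice_to_natCast ids (t+1)
    push_cast at h
    exact h
  have e2 : PySem.List.slice ids (some ((t : Int) + 1)) none = ids.drop (t+1) := by
    have h := PySem.List.slice_from_natCast ids (t+1)
    push_cast at h
    exact h
  have hF : 0 < (ids.take (t+1)).length := by
    simp [List.length_take]
    omega
  simp only [pvPA, pvPB, e1, e2, PySem.List.slice?_none_none_neg_one, Option.getD_some,
    List.length_reverse]
  exact pvKey _ _ hF


-- ---------- border theory: proper borders and the longest proper border ----------

-- L is a proper border of w: the length-L prefix equals the length-L suffix
def pvIsB (w : List (Option Int)) (L : Nat) : Prop :=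
  L < w.length ∧ w.take L = w.drop (w.length - L)

-- the longest proper border of w
def pvMB (w : List (Option Int)) : Nat :=
  Nat.findGreatest (fun L => w.take L = w.drop (w.length - L)) (w.length - 1)

lemma pvMB_isB (w : List (Option Int)) (hw : w ≠ []) : pvIsB w (pvMB w) := by
  have hlen : 0 < w.length := List.length_pos_iff.mpr hw
  constructor
  · have := Nat.findGreatest_le (P := fun L => w.take L = w.drop (w.length - L)) (w.length - 1)
    unfold pvMB; omega
  · exact Nat.findGreatest_spec (P := fun L => w.take L = w.drop (w.length - L)) (m := 0)
      (Nat.zero_le _) (by simp)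

lemma pvIsB_le_mb (w : List (Option Int)) (L : Nat) (h : pvIsB w L) : L ≤ pvMB w := by
  obtain ⟨h1, h2⟩ := h
  exact Nat.le_findGreatest (by omega) h2

lemma pvMB_lt (w : List (Option Int)) (hw : w ≠ []) : pvMB w < w.length := by
  have hlen : 0 < w.length := List.length_pos_iff.mpr hw
  have := Nat.findGreatest_le (P := fun L => w.take L = w.drop (w.length - L)) (w.length - 1)
  unfold pvMB; omega

-- a smaller border is a proper border of the larger border
lemma pvIsB_down (w : List (Option Int)) {L L' : Nat} (hlt : L' < L)
    (hB' : pvIsB w L') (hB : pvIsB w L) : pvIsB (w.take L) L' := by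
  obtain ⟨h1', h2'⟩ := hB'
  obtain ⟨h1, h2⟩ := hB
  have hlenw : (w.take L).length = L := by
    rw [List.length_take]; omega
  refine ⟨by omega, ?_⟩
  rw [hlenw, List.take_take, min_eq_left hlt.le, h2, List.drop_drop, h2']
  congr 1
  omega

-- a border of a border is a border
lemma pvIsB_up (w : List (Option Int)) {L L' : Nat}
    (hB' : pvIsB (w.take L) L') (hB : pvIsB w L) : pvIsB w L' := by
  obtain ⟨h1', h2'⟩ := hB'
  obtain ⟨h1, h2⟩ := hB
  have hlenw : (w.take L).length = L := by
    rw [List.length_take]; omega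
  rw [hlenw] at h1' h2'
  refine ⟨by omega, ?_⟩
  rw [List.take_take, min_eq_left (by omega)] at h2'
  rw [h2, List.drop_drop] at h2'
  rw [h2']
  congr 1
  omega

-- extending a border by one matching element
lemma pvIsB_ext (w : List (Option Int)) {i L : Nat} (hi : i < w.length) (hL : L < i) :
    pvIsB (w.take (i+1)) (L+1) ↔ pvIsB (w.take i) L ∧ w.getD L none = w.getD i none := by
  have hLw : L < w.length := by omega
  have hleni1 : (w.take (i+1)).length = i + 1 := by rw [List.length_take]; omega
  have hleni : (w.take i).length = i := by rw [List.length_take]; omega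
  have hwi : w.take (i+1) = w.take i ++ [w.getD i none] := by
    rw [List.take_add_one, List.getD_eq_getElem w none hi]
    simp [List.getElem?_eq_getElem hi]
  have hwL : w.take (L+1) = w.take L ++ [w.getD L none] := by
    rw [List.take_add_one, List.getD_eq_getElem w none hLw]
    simp [List.getElem?_eq_getElem hLw]
  constructor
  · rintro ⟨hlt, heq⟩
    rw [hleni1] at hlt heq
    rw [List.take_take, min_eq_left (by omega), hwL] at heq
    rw [hwi] at heq
    rw [show i + 1 - (L+1) = i - L by omega,
      List.drop_append_of_le_length (by omega : i - L ≤ (w.take i).length)] at heq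
    have hlens : (w.take L).length = (List.drop (i - L) (w.take i)).length := by
      rw [List.length_take, List.length_drop, hleni]; omega
    obtain ⟨e1, e2⟩ := List.append_inj heq hlens
    refine ⟨⟨by omega, ?_⟩, by simpa using e2⟩
    rw [hleni, List.take_take, min_eq_left (by omega)]
    exact e1
  · rintro ⟨⟨hlt, heq⟩, hmatch⟩
    rw [hleni] at hlt heq
    rw [List.take_take, min_eq_left (by omega)] at heq
    refine ⟨by omega, ?_⟩
    rw [hleni1, List.take_take, min_eq_left (by omega), hwL, hwi,
      show i + 1 - (L+1) = i - L by omega,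
      List.drop_append_of_le_length (by omega : i - L ≤ (w.take i).length)]
    rw [heq, hmatch]

-- ---------- correctness of the fuel-guarded KMP loops ----------

-- the while-loop finds the longest border k* ≤ k of w.take i with w[k*] matching w[i] (or 0)
lemma pvFall_spec (w : List (Option Int)) (f : List Nat) (i : Nat)
    (_hi : 1 ≤ i) (hiw : i ≤ w.length)
    (hf : ∀ j, j ≤ i → f.getD j 0 = pvMB (w.take j)) :
    ∀ fuel k, k ≤ fuel → pvIsB (w.take i) k →
      pvIsB (w.take i) (pvFall w f (w.getD i none) fuel k) ∧
      (pvFall w f (w.getD i none) fuel k = 0 ∨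
        w.getD (pvFall w f (w.getD i none) fuel k) none = w.getD i none) ∧
      (∀ L, pvIsB (w.take i) L → w.getD L none = w.getD i none → L ≤ k →
        L ≤ pvFall w f (w.getD i none) fuel k) := by
  have hleni : (w.take i).length = i := by rw [List.length_take]; omega
  intro fuel
  induction fuel with
  | zero =>
    intro k hk hB
    interval_cases k
    exact ⟨hB, Or.inl rfl, fun L _ _ hL => hL⟩
  | succ fuel ih =>
    intro k hk hB
    by_cases hc : 0 < k ∧ w.getD k none ≠ w.getD i none
    · rw [pvFall, if_pos hc]
      have hki : k < i := by have := hB.1; omega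
      have hfk : f.getD k 0 = pvMB (w.take k) := hf k (by omega)
      have hne : w.take k ≠ [] := by
        have : (w.take k).length = k := by rw [List.length_take]; omega
        intro hnil; rw [hnil] at this; simp at this; omega
      have hmb := pvMB_isB (w.take k) hne
      have hmlt : pvMB (w.take k) < k := by
        have := pvMB_lt (w.take k) hne
        rwa [List.length_take, min_eq_left (by omega)] at this
      have htk : (w.take i).take k = w.take k := by
        rw [List.take_take, min_eq_left (by omega)]
      have hBm : pvIsB (w.take i) (pvMB (w.take k)) := by
        apply pvIsB_up (w.take i) (L := k)
        · rwa [htk]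
        · exact hB
      rw [hfk]
      obtain ⟨r1, r2, r3⟩ := ih (pvMB (w.take k)) (by omega) hBm
      refine ⟨r1, r2, ?_⟩
      intro L hL hmatch hLk
      rcases Nat.lt_or_ge L k with hlt | hge
      · apply r3 L hL hmatch
        apply pvIsB_le_mb
        rw [← htk]
        exact pvIsB_down (w.take i) hlt hL hB
      · exfalso
        have : L = k := by omega
        subst this
        exact hc.2 hmatch
    · rw [pvFall, if_neg hc]
      push Not at hc
      refine ⟨hB, ?_, fun L _ _ hL => hL⟩
      by_cases hk0 : k = 0
      · exact Or.inl hk0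
      · exact Or.inr (hc (by omega))

-- one iteration of the failure-function loop computes the next longest border
lemma pvKmpStep_spec (w : List (Option Int)) (f : List Nat) (i : Nat)
    (hi : 1 ≤ i) (hiw : i < w.length)
    (hf : ∀ j, j ≤ i → f.getD j 0 = pvMB (w.take j)) :
    pvKmpStep w (f, pvMB (w.take i)) i
      = (f ++ [pvMB (w.take (i+1))], pvMB (w.take (i+1))) := by
  have hleni : (w.take i).length = i := by rw [List.length_take]; omega
  have hne : w.take i ≠ [] := by
    intro hnil; rw [hnil] at hleni; simp at hleni; omega
  have hklt : pvMB (w.take i) < i := by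
    have := pvMB_lt (w.take i) hne; omega
  have hBk : pvIsB (w.take i) (pvMB (w.take i)) := pvMB_isB (w.take i) hne
  obtain ⟨r1, r2, r3⟩ := pvFall_spec w f i hi (by omega) hf (pvMB (w.take i))
    (pvMB (w.take i)) (le_refl _) hBk
  set r := pvFall w f (w.getD i none) (pvMB (w.take i)) (pvMB (w.take i)) with hr
  have hri : r < i := by have := r1.1; omega
  have hne1 : (w.take (i+1)) ≠ [] := by
    have : (w.take (i+1)).length = i+1 := by rw [List.length_take]; omega
    intro hnil; rw [hnil] at this; simp at this
  -- the new value k1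
  by_cases hmatch : w.getD i none = w.getD r none
  · have hB1 : pvIsB (w.take (i+1)) (r+1) :=
      (pvIsB_ext w hiw hri).mpr ⟨r1, hmatch.symm⟩
    have hub : pvMB (w.take (i+1)) ≤ r + 1 := by
      rcases Nat.eq_zero_or_pos (pvMB (w.take (i+1))) with h0 | hpos
      · omega
      · obtain ⟨L, hL⟩ : ∃ L, pvMB (w.take (i+1)) = L + 1 :=
          ⟨pvMB (w.take (i+1)) - 1, by omega⟩
        have hBL := pvMB_isB (w.take (i+1)) hne1
        rw [hL] at hBL
        have hLi : L < i := by
          have := hBL.1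
          rw [List.length_take] at this
          omega
        obtain ⟨hBL', hmL⟩ := (pvIsB_ext w hiw hLi).mp hBL
        have : L ≤ r := r3 L hBL' hmL (pvIsB_le_mb _ _ hBL')
        omega
    have : pvMB (w.take (i+1)) = r + 1 :=
      le_antisymm hub (pvIsB_le_mb _ _ hB1)
    simp only [pvKmpStep, ← hr, if_pos hmatch, this]
  · have hr0 : r = 0 := by
      rcases r2 with h | h
      · exact h
      · exact absurd h.symm hmatch
    rw [hr0] at hmatch
    have : pvMB (w.take (i+1)) = 0 := by
      rcases Nat.eq_zero_or_pos (pvMB (w.take (i+1))) with h0 | hpos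
      · exact h0
      · exfalso
        obtain ⟨L, hL⟩ : ∃ L, pvMB (w.take (i+1)) = L + 1 :=
          ⟨pvMB (w.take (i+1)) - 1, by omega⟩
        have hBL := pvMB_isB (w.take (i+1)) hne1
        rw [hL] at hBL
        have hLi : L < i := by
          have := hBL.1
          rw [List.length_take] at this
          omega
        obtain ⟨hBL', hmL⟩ := (pvIsB_ext w hiw hLi).mp hBL
        have : L ≤ r := r3 L hBL' hmL (pvIsB_le_mb _ _ hBL')
        rw [hr0] at this
        interval_cases L
        exact hmatch hmL.symm
    simp only [pvKmpStep, ← hr, hr0, if_neg hmatch, this]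

-- invariant of the for-loop over i = 1 .. m-1
lemma pvKmpFold_spec (w : List (Option Int)) (hw : 1 ≤ w.length) :
    ∀ c, c + 1 ≤ w.length →
      (((List.range' 1 c).foldl (pvKmpStep w) ([0, 0], 0)).1.length = c + 2 ∧
       ∀ j, j ≤ c + 1 →
        ((List.range' 1 c).foldl (pvKmpStep w) ([0, 0], 0)).1.getD j 0 = pvMB (w.take j)) ∧
      ((List.range' 1 c).foldl (pvKmpStep w) ([0, 0], 0)).2 = pvMB (w.take (c+1)) := by
  intro c
  induction c with
  | zero =>
    intro _
    have h0 : pvMB (w.take 0) = 0 := by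
      unfold pvMB; simp
    have h1 : pvMB (w.take 1) = 0 := by
      unfold pvMB
      have : (w.take 1).length = 1 := by rw [List.length_take]; omega
      rw [this]
      simp
    refine ⟨⟨rfl, ?_⟩, by simpa using h1.symm⟩
    intro j hj
    interval_cases j
    · simpa using h0.symm
    · simpa using h1.symm
  | succ c ih =>
    intro hc1
    obtain ⟨⟨hlen, hgetD⟩, hk⟩ := ih (by omega)
    have hrange : List.range' 1 (c+1) = List.range' 1 c ++ [1 + c] := by
      simpa using List.range'_concat (s := 1) (n := c) (step := 1)
    rw [hrange, List.foldl_append, List.foldl_cons, List.foldl_nil]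
    set st := (List.range' 1 c).foldl (pvKmpStep w) ([0, 0], 0) with hst
    have hstep := pvKmpStep_spec w st.1 (c + 1) (by omega) (by omega)
      (fun j hj => hgetD j (by omega))
    have hic : 1 + c = c + 1 := by omega
    rw [hic]
    have hgoalstep : pvKmpStep w st (c+1)
        = (st.1 ++ [pvMB (w.take (c+1+1))], pvMB (w.take (c+1+1))) := by
      calc pvKmpStep w st (c+1)
          = pvKmpStep w (st.1, pvMB (w.take (c+1))) (c+1) := by rw [← hk]
        _ = _ := hstep
    rw [hgoalstep]
    refine ⟨⟨by simp [hlen], ?_⟩, rfl⟩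
    intro j hj
    rcases Nat.lt_or_ge j (c+2) with hlt | hge
    · rw [List.getD_eq_getElem _ _ (by simp [hlen]; omega),
        List.getElem_append_left (by omega : j < st.1.length),
        ← List.getD_eq_getElem _ _ (by omega : j < st.1.length)]
      exact hgetD j (by omega)
    · have hj2 : j = c + 2 := by omega
      subst hj2
      rw [List.getD_eq_getElem _ _ (by simp [hlen])]
      have : st.1.length = c + 2 := hlen
      simp [List.getElem_append_right, this]

-- the failure table is correct
lemma pvKmpF_spec (w : List (Option Int)) (hw : 1 ≤ w.length) :
    ∀ j, j ≤ w.length → (pvKmpF w).getD j 0 = pvMB (w.take j) := by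
  intro j hj
  obtain ⟨⟨_, hgetD⟩, _⟩ := pvKmpFold_spec w hw (w.length - 1) (by omega)
  unfold pvKmpF
  have : w.length - 1 + 1 = w.length := by omega
  rw [this] at hgetD
  exact hgetD j hj

-- the border chain from pvMB (w.take c) enumerates the positive borders of w.take c
lemma pvChain_spec (w : List (Option Int)) (hw : 1 ≤ w.length) :
    ∀ fuel c, c ≤ fuel → c ≤ w.length →
      ∀ x, x ∈ pvChain (pvKmpF w) fuel (pvMB (w.take c)) ↔
        (0 < x ∧ pvIsB (w.take c) x) := by
  intro fuel
  induction fuel with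
  | zero =>
    intro c hc _ x
    interval_cases c
    simp only [pvChain, List.not_mem_nil, false_iff]
    rintro ⟨hx, hB, -⟩
    simp only [List.take_zero, List.length_nil] at hB
    omega
  | succ fuel ih =>
    intro c hc hcw x
    by_cases hb : 0 < pvMB (w.take c)
    · have hcpos : 1 ≤ c := by
        by_contra h
        have : c = 0 := by omega
        subst this
        unfold pvMB at hb
        simp at hb
      have hlenc : (w.take c).length = c := by rw [List.length_take]; omega
      have hne : w.take c ≠ [] := by
        intro hnil; rw [hnil] at hlenc; simp at hlenc; omega
      have hblt : pvMB (w.take c) < c := by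
        have := pvMB_lt (w.take c) hne; omega
      have hBb := pvMB_isB (w.take c) hne
      rw [pvChain, if_pos hb,
        pvKmpF_spec w hw (pvMB (w.take c)) (by omega)]
      have htk : (w.take c).take (pvMB (w.take c)) = w.take (pvMB (w.take c)) := by
        rw [List.take_take, min_eq_left (by omega)]
      constructor
      · intro hmem
        rcases List.mem_cons.mp hmem with heq | htail
        · subst heq
          exact ⟨hb, hBb⟩
        · obtain ⟨hx, hBx⟩ := (ih (pvMB (w.take c)) (by omega) (by omega) x).mp htail
          refine ⟨hx, pvIsB_up (w.take c) (L := pvMB (w.take c)) ?_ hBb⟩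
          rwa [htk]
        
      · rintro ⟨hx, hBx⟩
        have hxb : x ≤ pvMB (w.take c) := pvIsB_le_mb _ _ hBx
        rcases Nat.lt_or_ge x (pvMB (w.take c)) with hlt | hge
        · apply List.mem_cons_of_mem
          apply (ih (pvMB (w.take c)) (by omega) (by omega) x).mpr
          refine ⟨hx, ?_⟩
          rw [← htk]
          exact pvIsB_down (w.take c) hlt hBx hBb
        · have : x = pvMB (w.take c) := by omega
          subst this
          exact List.mem_cons_self
    · rw [pvChain, if_neg hb]
      simp only [List.not_mem_nil, false_iff]
      rintro ⟨hx, hBx⟩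
      have := pvIsB_le_mb _ _ hBx
      omega

-- ---------- the separator construction: borders of s+[none]+reversed(s) ----------

def pvT (s : List Int) : List (Option Int) :=
  s.map some ++ [none] ++ (s.reverse.map some)

lemma pvT_length (s : List Int) : (pvT s).length = 2 * s.length + 1 := by
  simp [pvT]; omega

-- borders of pvT s never reach past the separator
lemma pvIsB_T_le (s : List Int) (L : Nat) (h : pvIsB (pvT s) L) : L ≤ s.length := by
  obtain ⟨h1, h2⟩ := h
  rw [pvT_length] at h1 h2
  by_contra hgt
  push Not at hgt
  set n := s.length with hn
  have hLle : L ≤ 2 * n := by omega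
  have e1 : ((pvT s).take L)[n]? = some none := by
    rw [List.getElem?_take, if_pos (by omega)]
    unfold pvT
    rw [List.getElem?_append_left (by simp; omega),
      List.getElem?_append_right (by simp; omega)]
    simp [hn]
  have e2 : ((pvT s).drop (2 * n + 1 - L))[n]? = (pvT s)[2 * n + 1 - L + n]? := by
    rw [List.getElem?_drop]
  have e4 : ∃ y, (pvT s)[2 * n + 1 - L + n]? = some (some y) := by
    unfold pvT
    rw [List.getElem?_append_right (by simp; omega)]
    simp only [List.length_append, List.length_map, List.length_nil, List.length_cons]
    rw [show 2 * n + 1 - L + n - (s.length + 1) = 2 * n - L by omega]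
    have hlt : 2 * n - L < (s.reverse.map some).length := by simp; omega
    rw [List.getElem?_eq_getElem hlt]
    exact ⟨(s.reverse.map some)[2 * n - L].getD 0, by simp⟩
  obtain ⟨y, hy⟩ := e4
  rw [h2, e2, hy] at e1
  simp at e1

-- within the first half, borders of pvT s are exactly the palindromic prefixes of s
lemma pvIsB_T_iff (s : List Int) (L : Nat) (hL : L ≤ s.length) :
    pvIsB (pvT s) L ↔ s.take L = (s.take L).reverse := by
  set n := s.length with hn
  have hlen : (pvT s).length = 2 * n + 1 := pvT_length s
  have e1 : (pvT s).take L = (s.take L).map some := by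
    unfold pvT
    rw [List.append_assoc, List.take_append_of_le_length (by simp; omega),
      List.map_take]
  have e2 : (pvT s).drop (2 * n + 1 - L) = ((s.take L).reverse).map some := by
    unfold pvT
    rw [List.drop_append]
    rw [List.drop_eq_nil_of_le (by simp; omega), List.nil_append]
    simp only [List.length_append, List.length_map, List.length_nil, List.length_cons]
    rw [show 2 * n + 1 - L - (s.length + 1) = n - L by omega]
    rw [← List.map_drop]
    congr 1
    rw [List.reverse_take, hn]
  constructor
  · rintro ⟨-, h2⟩
    rw [hlen, e1, e2] at h2
    exact (List.map_injective_iff.mpr (Option.some_injective _)) h2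
  · intro h
    refine ⟨by omega, ?_⟩
    rw [hlen, e1, e2, ← h]

-- membership in Source B's pal_prefix_lengths: exactly the positive palindromic prefix lengths
lemma pvPals_mem (s : List Int) (L : Nat) :
    L ∈ pvPalPrefixLengths s ↔ (0 < L ∧ L ≤ s.length ∧ s.take L = (s.take L).reverse) := by
  have hw : 1 ≤ (pvT s).length := by rw [pvT_length]; omega
  have hfull : (pvT s).take (pvT s).length = pvT s := List.take_length
  have hmb : (pvKmpF (pvT s)).getD (pvT s).length 0 = pvMB (pvT s) := by
    have := pvKmpF_spec (pvT s) hw (pvT s).length (le_refl _)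
    rwa [hfull] at this
  have hchain := pvChain_spec (pvT s) hw (pvT s).length (pvT s).length
    (le_refl _) (le_refl _) L
  rw [hfull] at hchain
  have hdef : pvPalPrefixLengths s
      = pvChain (pvKmpF (pvT s)) (pvT s).length ((pvKmpF (pvT s)).getD (pvT s).length 0) := rfl
  rw [hdef, hmb, hchain]
  constructor
  · rintro ⟨hpos, hB⟩
    exact ⟨hpos, pvIsB_T_le s L hB, (pvIsB_T_iff s L (pvIsB_T_le s L hB)).mp hB⟩
  · rintro ⟨hpos, hle, hpal⟩
    exact ⟨hpos, (pvIsB_T_iff s L hle).mpr hpal⟩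

-- ---------- bridge: the per-cut mirror test vs even palindromic prefixes/suffixes ----------

-- an even-length prefix is a palindrome iff its reversed first half equals its second half
lemma pvPalHalf (s : List Int) (m : Nat) (h2m : 2 * m ≤ s.length) :
    (s.take (2*m) = (s.take (2*m)).reverse) ↔ ((s.take m).reverse = (s.drop m).take m) := by
  have htk : (s.take (2*m)).take m = s.take m := by
    rw [List.take_take, min_eq_left (by omega)]
  have hdk : (s.take (2*m)).drop m = (s.drop m).take m := by
    rw [List.drop_take, show 2*m - m = m by omega]
  have hla : (s.take m).length = m := by rw [List.length_take]; omega
  have hlb : ((s.drop m).take m).length = m := by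
    rw [List.length_take, List.length_drop]; omega
  have hw : s.take (2*m) = s.take m ++ (s.drop m).take m := by
    conv_lhs => rw [← List.take_append_drop m (s.take (2*m))]
    rw [htk, hdk]
  have hr : (s.take (2*m)).reverse = ((s.drop m).take m).reverse ++ (s.take m).reverse := by
    conv_lhs => rw [← List.take_append_drop m (s.take (2*m))]
    rw [List.reverse_append, htk, hdk]
  constructor
  · intro h
    rw [hr, hw] at h
    obtain ⟨e1, -⟩ := List.append_inj h (by rw [hla, List.length_reverse, hlb])
    rw [e1, List.reverse_reverse]
  · intro h
    rw [hr, hw, ← h, List.reverse_reverse]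

-- the per-cut mirror test, characterised by even palindromic prefixes/suffixes
lemma pvPB_iff (ids : List Int) (t : Nat) (ht : t < ids.length) :
    pvPB ids t = true ↔
      ((2*t+2 ≤ ids.length ∧ ids.take (2*t+2) = (ids.take (2*t+2)).reverse)
       ∨ (ids.length < 2*t+2 ∧ t+2 ≤ ids.length ∧
          ids.reverse.take (2*(ids.length-1-t))
            = (ids.reverse.take (2*(ids.length-1-t))).reverse)) := by
  set n := ids.length with hn
  have h1 : ((ids.take (t+1)).reverse).length = t+1 := by
    rw [List.length_reverse, List.length_take]; omega
  have h2 : (ids.drop (t+1)).length = n - t - 1 := by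
    rw [List.length_drop]; omega
  simp only [pvPB, decide_eq_true_eq, h1, h2]
  by_cases hc : t + 1 ≤ n - t - 1
  · have hkk : min (t+1) (n-t-1) = t+1 := by omega
    rw [hkk]
    have htkfull : ((ids.take (t+1)).reverse).take (t+1) = (ids.take (t+1)).reverse :=
      List.take_of_length_le (le_of_eq h1)
    rw [htkfull]
    have hP := pvPalHalf ids (t+1) (by omega)
    rw [show 2*(t+1) = 2*t+2 by omega] at hP
    constructor
    · rintro ⟨-, heq⟩
      exact Or.inl ⟨by omega, hP.mpr heq⟩
    · rintro (⟨-, hpal⟩ | ⟨hgt, -, -⟩)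
      · exact ⟨by omega, hP.mp hpal⟩
      · omega
  · by_cases hz : n - t - 1 = 0
    · have hkk : min (t+1) (n-t-1) = 0 := by omega
      rw [hkk]
      constructor
      · rintro ⟨h0, -⟩; omega
      · rintro (⟨hle, -⟩ | ⟨-, hle, -⟩) <;> omega
    · have hkk : min (t+1) (n-t-1) = n-t-1 := by omega
      rw [hkk]
      have hrest : (ids.drop (t+1)).take (n-t-1) = ids.drop (t+1) :=
        List.take_of_length_le (le_of_eq h2)
      rw [hrest]
      have hP := pvPalHalf ids.reverse (n-t-1)
        (by rw [List.length_reverse]; omega)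
      rw [show 2*(n-t-1) = 2*(n-1-t) by omega] at hP
      have ha : ids.reverse.take (n-t-1) = (ids.drop (t+1)).reverse := by
        rw [List.reverse_drop, ← hn, show n - (t+1) = n-t-1 by omega]
      have hb : ids.reverse.drop (n-t-1) = (ids.take (t+1)).reverse := by
        rw [List.reverse_take, ← hn, show n - (t+1) = n-t-1 by omega]
      rw [ha, hb, List.reverse_reverse] at hP
      constructor
      · rintro ⟨-, heq⟩
        exact Or.inr ⟨by omega, by omega, hP.mpr heq.symm⟩
      · rintro (⟨hle, -⟩ | ⟨-, -, hpal⟩)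
        · omega
        · exact ⟨by omega, (hP.mp hpal).symm⟩

-- membership bridge between A's cut indices and B's palindromic lengths
lemma pvBridge (ids : List Int) (x : Int) :
    (∃ t : Nat, t < ids.length ∧ pvPB ids t = true ∧ x = (t : Int)) ↔
    ((∃ L ∈ pvPalPrefixLengths ids, L % 2 = 0 ∧ x = ((L / 2 : Nat) : Int) - 1) ∨
     (∃ M ∈ pvPalPrefixLengths ids.reverse, (M % 2 = 0 ∧ M < ids.length) ∧
        x = (ids.length : Int) - 1 - ((M / 2 : Nat) : Int))) := by
  set n := ids.length with hn
  constructor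
  · rintro ⟨t, ht, hPB, rfl⟩
    rcases (pvPB_iff ids t ht).mp hPB with ⟨hle, hpal⟩ | ⟨hgt, hle2, hpal⟩
    · refine Or.inl ⟨2*t+2, (pvPals_mem ids (2*t+2)).mpr ⟨by omega, by omega, hpal⟩,
        by omega, ?_⟩
      have : (2*t+2)/2 = t+1 := by omega
      rw [this]
      push_cast
      ring
    · refine Or.inr ⟨2*(n-1-t), (pvPals_mem ids.reverse (2*(n-1-t))).mpr
        ⟨by omega, by rw [List.length_reverse]; omega, hpal⟩, ⟨by omega, by omega⟩, ?_⟩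
      have : (2*(n-1-t))/2 = n-1-t := by omega
      rw [this]
      omega
  · rintro (⟨L, hmem, heven, rfl⟩ | ⟨M, hmem, ⟨heven, hltn⟩, rfl⟩)
    · obtain ⟨hpos, hle, hpal⟩ := (pvPals_mem ids L).mp hmem
      refine ⟨L/2 - 1, by omega, ?_, by omega⟩
      apply (pvPB_iff ids (L/2-1) (by omega)).mpr
      refine Or.inl ⟨by omega, ?_⟩
      rw [show 2*(L/2-1)+2 = L by omega]
      exact hpal
    · obtain ⟨hpos, hle, hpal⟩ := (pvPals_mem ids.reverse M).mp hmem
      rw [List.length_reverse] at hle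
      refine ⟨n - 1 - M/2, by omega, ?_, by omega⟩
      apply (pvPB_iff ids (n-1-M/2) (by omega)).mpr
      refine Or.inr ⟨by omega, by omega, ?_⟩
      rw [show 2*(n-1-(n-1-M/2)) = M by omega]
      exact hpal

-- ---------- the set-building folds of B ----------

lemma pvMemFoldAdd (p : Nat → Prop) [DecidablePred p] (g : Nat → Int) (l : List Nat) :
    ∀ (r0 : List Int) (x : Int),
      x ∈ l.foldl (fun r L => if p L then PySem.Set.add r (g L) else r) r0
        ↔ x ∈ r0 ∨ ∃ L ∈ l, p L ∧ x = g L := by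
  induction l with
  | nil => simp
  | cons a l ih =>
    intro r0 x
    rw [List.foldl_cons]
    by_cases hp : p a
    · rw [if_pos hp, ih]
      simp only [PySem.Set.mem_add, List.mem_cons]
      constructor
      · rintro ((h | h) | ⟨L, hL, hpL, hx⟩)
        · exact Or.inl h
        · exact Or.inr ⟨a, Or.inl rfl, hp, h⟩
        · exact Or.inr ⟨L, Or.inr hL, hpL, hx⟩
      · rintro (h | ⟨L, (rfl | hL), hpL, hx⟩)
        · exact Or.inl (Or.inl h)
        · exact Or.inl (Or.inr hx)
        · exact Or.inr ⟨L, hL, hpL, hx⟩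
    · rw [if_neg hp, ih]
      simp only [List.mem_cons]
      constructor
      · rintro (h | ⟨L, hL, hpL, hx⟩)
        · exact Or.inl h
        · exact Or.inr ⟨L, Or.inr hL, hpL, hx⟩
      · rintro (h | ⟨L, (rfl | hL), hpL, hx⟩)
        · exact Or.inl h
        · exact absurd hpL hp
        · exact Or.inr ⟨L, hL, hpL, hx⟩

lemma pvNodupFoldAdd (p : Nat → Prop) [DecidablePred p] (g : Nat → Int) (l : List Nat) :
    ∀ (r0 : List Int), r0.Nodup →
      (l.foldl (fun r L => if p L then PySem.Set.add r (g L) else r) r0).Nodup := by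
  induction l with
  | nil => intro r0 h; exact h
  | cons a l ih =>
    intro r0 h
    rw [List.foldl_cons]
    by_cases hp : p a
    · rw [if_pos hp]
      exact ih _ (PySem.Set.nodup_add _ _ h)
    · rw [if_neg hp]
      exact ih _ h

-- ---------- assembly ----------

theorem pv_main (ids : List Int) :
    get_last_mirror_index_set ids = get_last_mirror_index_set_alt ids := by
  have hfil : List.filter (fun t : Nat => pvPA ids (t:Int)) (List.range ids.length)
      = List.filter (fun t : Nat => pvPB ids t) (List.range ids.length) :=
    List.filter_congr (fun t htmem => by
      rw [pvP_pointwise ids t (List.mem_range.mp htmem)])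
  have hBdef : get_last_mirror_index_set_alt ids
      = PySem.List.sorted
          ((pvPalPrefixLengths ids.reverse).foldl
            (fun r M => if M % 2 = 0 ∧ M < ids.length then
                PySem.Set.add r ((ids.length : Int) - 1 - ((M / 2 : Nat) : Int)) else r)
            ((pvPalPrefixLengths ids).foldl
              (fun r L => if L % 2 = 0 then PySem.Set.add r (((L / 2 : Nat) : Int) - 1) else r)
              ([] : List Int)))
          (fun x => x) false := rfl
  have hpair : (List.map (fun t : Nat => (t : Int))
      (List.filter (fun t : Nat => pvPB ids t) (List.range ids.length))).Pairwise
        (fun a b : Int => a < b) :=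
    List.pairwise_map.mpr (((List.pairwise_lt_range).filter _).imp
      (fun h => by exact_mod_cast h))
  have hnodup : (List.map (fun t : Nat => (t : Int))
      (List.filter (fun t : Nat => pvPB ids t) (List.range ids.length))).Nodup :=
    hpair.imp (fun h => ne_of_lt h)
  have hysmem : ∀ x : Int,
      x ∈ List.map (fun t : Nat => (t : Int))
            (List.filter (fun t : Nat => pvPB ids t) (List.range ids.length))
        ↔ ∃ t : Nat, t < ids.length ∧ pvPB ids t = true ∧ x = (t : Int) := by
    intro x
    simp only [List.mem_map, List.mem_filter, List.mem_range]
    constructor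
    · rintro ⟨t, ⟨ht, hp⟩, rfl⟩; exact ⟨t, ht, hp, rfl⟩
    · rintro ⟨t, ht, hp, rfl⟩; exact ⟨t, ⟨ht, hp⟩, rfl⟩
  rw [pvA_eq, hfil, hBdef]
  apply Eq.symm
  apply PySem.List.sorted_eq_of_perm_of_pairwise_lt
  · rw [List.perm_ext_iff_of_nodup hnodup
      (pvNodupFoldAdd _ _ _ _ (pvNodupFoldAdd _ _ _ _ List.nodup_nil))]
    intro a
    rw [hysmem a,
      pvMemFoldAdd (fun M => M % 2 = 0 ∧ M < ids.length)
        (fun M => (ids.length : Int) - 1 - ((M / 2 : Nat) : Int)) _ _ a,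
      pvMemFoldAdd (fun L => L % 2 = 0)
        (fun L => ((L / 2 : Nat) : Int) - 1) _ _ a]
    simp only [List.not_mem_nil, false_or]
    exact pvBridge ids a
  · exact hpair

-- ===== VERDICT (by name: the statement is the Claim_ definition above) =====
theorem get_last_mirror_index_set_spec : Claim_equal_get_last_mirror_index_set := by
  intro ids _
  unfold Spec_get_last_mirror_index_set
  exact pv_main ids
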